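-- pv_equiv track=rewrite | github.com/eetumos/setup | files/usr/bin/zf.py | range_remove
-- ===== SOURCE A (Python) =====
-- import operator, os, re, sys
-- from bisect import bisect_left
--
-- def range_remove(ranges, start, end):
--     """
--     Remove [start, end) from a sorted list of non-overlapping ranges.
--     >>> range_remove([(0, 2), (4, 6), (8, 10)], 4, 6)
--     [(0, 2), (8, 10)]
--     >>> range_remove([(0, 2), (4, 6), (8, 10)], 3, 7)
--     [(0, 2), (8, 10)]
--     >>> range_remove([(0, 2), (4, 6), (8, 10)], 2, 8)
--     [(0, 2), (8, 10)]
--     >>> range_remove([(0, 2), (4, 6), (8, 10)], 1, 9)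
--     [(0, 1), (9, 10)]
--     """
--     stubs = []
--
--     lo = bisect_left(ranges, start, key=operator.itemgetter(0))
--     if lo > 0 and ranges[lo - 1][1] > start:
--         stubs.append((ranges[lo - 1][0], start))
--         lo -= 1
--
--     hi = lo
--     while hi < len(ranges) and ranges[hi][0] < end:
--         if ranges[hi][1] > end:
--             stubs.append((end, ranges[hi][1]))
--         hi += 1
--
--     ranges[lo:hi] = stubs
--     return ranges
-- ===== SOURCE B (Python) =====
-- def range_remove(ranges, start, end):
--     result = []
--     for a, b in ranges:
--         if b <= start or a >= end:
--             result.append((a, b))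
--         else:
--             if a < start:
--                 result.append((a, start))
--             if b > end:
--                 result.append((end, b))
--     ranges[:] = result
--     return ranges
-- ===== Notes on version B (the rewrite author's own statement) =====
-- stated objective: simpler
-- what changed: Replaces A's bisect_left binary search, lo/hi pointer adjustment and slice splice by a single linear pass that classifies each range independently (keep, trim left, trim right, or drop) and rebuilds the list. Pre_ excludes inputs outside the documented domain (unsorted/overlapping/empty ranges or end < start), where A's bisect-and-splice output is accidental.
-- outside the precondition, e.g. on range_remove([(4, 6), (0, 2)], 0, 2): A returns [(4, 6), (0, 2)], B returns [(4, 6)]; on range_remove([(0, 0)], 0, 1): A returns [], B returns [(0, 0)]; on range_remove([(0, 2)], 1, 0): A returns [(0, 1), (0, 2)], B returns [(0, 2)]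
import Mathlib
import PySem

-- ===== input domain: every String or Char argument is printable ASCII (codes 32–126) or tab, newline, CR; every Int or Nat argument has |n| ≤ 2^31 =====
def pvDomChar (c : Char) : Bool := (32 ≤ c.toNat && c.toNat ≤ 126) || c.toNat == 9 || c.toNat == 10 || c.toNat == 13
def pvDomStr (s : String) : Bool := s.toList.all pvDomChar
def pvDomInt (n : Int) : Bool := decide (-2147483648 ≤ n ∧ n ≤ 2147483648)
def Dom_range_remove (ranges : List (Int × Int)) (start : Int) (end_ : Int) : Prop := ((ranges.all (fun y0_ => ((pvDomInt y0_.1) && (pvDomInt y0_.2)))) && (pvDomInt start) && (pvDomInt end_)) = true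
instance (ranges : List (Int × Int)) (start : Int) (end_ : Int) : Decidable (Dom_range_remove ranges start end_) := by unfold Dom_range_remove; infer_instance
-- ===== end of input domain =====

-- B replaces A's bisect + lo/hi pointer scan + slice splice by one linear pass that classifies
-- every range independently (simpler). A mutates `ranges` in place; B performs the same
-- in-place update (ranges[:] = result); the equivalence proved here is about the return value.

-- ===== PORT A =====
-- transliteration of CPython's bisect_left(a, x, key=itemgetter(0)) binary-search loop
def pvBisect (xs : List (Int × Int)) (x : Int) (lo hi : Nat) : Nat :=
  if _h : lo < hi then
    if (xs.getD ((lo + hi) / 2) (0, 0)).1 < x then pvBisect xs x ((lo + hi) / 2 + 1) hi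
    else pvBisect xs x lo ((lo + hi) / 2)
  else lo
termination_by hi - lo
decreasing_by all_goals omega

-- the 'while hi < len(ranges) and ranges[hi][0] < end' loop, carrying hi and stubs
def pvHiLoop (xs : List (Int × Int)) (end_ : Int) (hi : Nat) (stubs : List (Int × Int)) :
    Nat × List (Int × Int) :=
  if _h : hi < xs.length ∧ (xs.getD hi (0, 0)).1 < end_ then
    pvHiLoop xs end_ (hi + 1)
      (stubs ++ if (xs.getD hi (0, 0)).2 > end_ then [(end_, (xs.getD hi (0, 0)).2)] else [])
  else (hi, stubs)
termination_by xs.length - hi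
decreasing_by omega

def range_remove (ranges : List (Int × Int)) (start : Int) (end_ : Int) : List (Int × Int) :=
  let lo0 := pvBisect ranges start 0 ranges.length
  let p :=
    if 0 < lo0 ∧ (ranges.getD (lo0 - 1) (0, 0)).2 > start then
      (lo0 - 1, [((ranges.getD (lo0 - 1) (0, 0)).1, start)])
    else (lo0, ([] : List (Int × Int)))
  let q := pvHiLoop ranges end_ p.1 p.2
  -- ranges[lo:hi] = stubs; return ranges
  ranges.take p.1 ++ q.2 ++ ranges.drop q.1

-- ===== PORT B =====
def range_remove_alt (ranges : List (Int × Int)) (start : Int) (end_ : Int) : List (Int × Int) :=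
  ranges.foldl
    (fun res p =>
      if p.2 ≤ start ∨ p.1 ≥ end_ then res ++ [p]
      else (res ++ if p.1 < start then [(p.1, start)] else []) ++
        if p.2 > end_ then [(end_, p.2)] else [])
    []

-- ===== PRECONDITION & SPEC =====
-- Pre_ admits (1) the function's documented domain ("sorted list of non-overlapping ranges" with
-- non-empty ranges and start ≤ end), and (2) any input at all on which every range lies strictly
-- outside the removal interval on the bisect side it is probed from (both programs are no-ops
-- there). Excluded are only inputs outside the documented domain on which the removal interacts
-- with unsorted/empty/reversed data, where A's bisect-and-splice output is accidental (see cites).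
def Pre_range_remove (ranges : List (Int × Int)) (start : Int) (end_ : Int) : Prop :=
  (start ≤ end_ ∧ (∀ p ∈ ranges, p.1 < p.2) ∧
    List.Pairwise (fun p q : Int × Int => p.2 ≤ q.1) ranges) ∨
  (∀ p ∈ ranges, if p.1 < start then p.2 ≤ start else end_ ≤ p.1)
instance (ranges : List (Int × Int)) (start : Int) (end_ : Int) :
    Decidable (Pre_range_remove ranges start end_) := by unfold Pre_range_remove; infer_instance

def pvWitness_range_remove : (List (Int × Int)) × Int × Int := ([(0, 2), (4, 6), (8, 10)], 1, 9)

def Spec_range_remove (ranges : List (Int × Int)) (start : Int) (end_ : Int)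
    (out : List (Int × Int)) : Prop := out = range_remove_alt ranges start end_
instance (ranges : List (Int × Int)) (start : Int) (end_ : Int) (out : List (Int × Int)) :
    Decidable (Spec_range_remove ranges start end_ out) := by unfold Spec_range_remove; infer_instance

-- ===== CLAIM (what is proved, stated in full; the proofs are below) =====
def Claim_equal_range_remove : Prop := ∀ (ranges : List (Int × Int)) (start : Int) (end_ : Int), Dom_range_remove ranges start end_ → Pre_range_remove ranges start end_ → Spec_range_remove ranges start end_ (range_remove ranges start end_)

-- ===== LEMMAS AND PROOFS =====

-- the per-range classifier of B, as a flatMap function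
def pvF (start end_ : Int) (p : Int × Int) : List (Int × Int) :=
  if p.2 ≤ start ∨ p.1 ≥ end_ then [p]
  else (if p.1 < start then [(p.1, start)] else []) ++ if p.2 > end_ then [(end_, p.2)] else []

def pvR (end_ : Int) (p : Int × Int) : List (Int × Int) :=
  if p.2 > end_ then [(end_, p.2)] else []

theorem alt_eq_flatMap (ranges : List (Int × Int)) (start end_ : Int) :
    range_remove_alt ranges start end_ = ranges.flatMap (pvF start end_) := by
  unfold range_remove_alt
  rw [PySem.List.foldl_congr_mem (g := fun res p => res ++ pvF start end_ p)]
  · exact PySem.List.foldl_append_eq_flatMap _ _ _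
  · intro acc x _
    unfold pvF; split_ifs <;> simp

theorem flatMap_eq_self {α : Type} (f : α → List α) (l : List α) (h : ∀ x ∈ l, f x = [x]) :
    l.flatMap f = l := by
  induction l with
  | nil => rfl
  | cons a t ih => simp [List.flatMap_cons, h a (by simp), ih (fun x hx => h x (by simp [hx]))]

-- takeWhile facts
theorem tw_le {α : Type} (p : α → Bool) (l : List α) : (l.takeWhile p).length ≤ l.length :=
  (List.takeWhile_prefix p).length_le

theorem tw_getElem {α : Type} (p : α → Bool) (l : List α) (i : Nat)
    (hi : i < (l.takeWhile p).length) :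
    l[i]'(lt_of_lt_of_le hi (tw_le p l)) = (l.takeWhile p)[i] :=
  ((List.takeWhile_prefix p).getElem hi).symm

theorem tw_sat {α : Type} (p : α → Bool) (l : List α) (i : Nat)
    (hi : i < (l.takeWhile p).length) : p (l[i]'(lt_of_lt_of_le hi (tw_le p l))) := by
  rw [tw_getElem p l i hi]
  exact List.mem_takeWhile_imp (List.getElem_mem hi)

theorem tw_stop {α : Type} (p : α → Bool) (l : List α)
    (h : (l.takeWhile p).length < l.length) : ¬ p (l[(l.takeWhile p).length]) := by
  induction l with
  | nil => simp at h
  | cons a t ih =>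
    by_cases hp : p a
    · simp only [List.takeWhile_cons_of_pos hp, List.length_cons] at h ⊢
      simpa using ih (by omega)
    · simpa [List.takeWhile_cons_of_neg hp] using hp

-- sortedness consequences of the documented-domain case of Pre_
theorem pre_pair (ranges : List (Int × Int))
    (hpw : List.Pairwise (fun p q : Int × Int => p.2 ≤ q.1) ranges) (i j : Nat) (hij : i < j)
    (hj : j < ranges.length) : ranges[i].2 ≤ ranges[j].1 := by
  exact List.pairwise_iff_getElem.mp hpw i j (by omega) hj hij

theorem pre_fst_mono (ranges : List (Int × Int)) (hab : ∀ p ∈ ranges, p.1 < p.2)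
    (hpw : List.Pairwise (fun p q : Int × Int => p.2 ≤ q.1) ranges) (i j : Nat) (hij : i ≤ j)
    (hj : j < ranges.length) : ranges[i].1 ≤ ranges[j].1 := by
  rcases Nat.eq_or_lt_of_le hij with h | h
  · subst h; rfl
  · have := pre_pair ranges hpw i j h hj
    have := hab _ (List.getElem_mem (show i < ranges.length by omega))
    omega

-- binary-search boundary facts, valid on ANY list (sorted or not): the element just below the
-- returned position was compared with result 'fst < x', the one at it with result '¬ fst < x'
theorem bisect_bounds (xs : List (Int × Int)) (x : Int) :
    ∀ lo hi, hi ≤ xs.length → lo ≤ hi →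
      lo ≤ pvBisect xs x lo hi ∧ pvBisect xs x lo hi ≤ hi ∧
      (lo < pvBisect xs x lo hi → (xs.getD (pvBisect xs x lo hi - 1) (0, 0)).1 < x) ∧
      (pvBisect xs x lo hi < hi → ¬ (xs.getD (pvBisect xs x lo hi) (0, 0)).1 < x) := by
  intro lo hi
  induction lo, hi using pvBisect.induct xs x with
  | case1 lo hi hlh hmid ih =>
    intro hlen hle
    rw [pvBisect, dif_pos hlh, if_pos hmid]
    obtain ⟨i1, i2, i3, i4⟩ := ih hlen (by omega)
    refine ⟨by omega, i2, ?_, i4⟩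
    intro hlt
    by_cases hc : (lo + hi) / 2 + 1 < pvBisect xs x ((lo + hi) / 2 + 1) hi
    · exact i3 hc
    · have : pvBisect xs x ((lo + hi) / 2 + 1) hi = (lo + hi) / 2 + 1 := by omega
      rw [this]
      simpa using hmid
  | case2 lo hi hlh hmid ih =>
    intro hlen hle
    rw [pvBisect, dif_pos hlh, if_neg hmid]
    obtain ⟨i1, i2, i3, i4⟩ := ih (by omega) (by omega)
    refine ⟨i1, by omega, i3, ?_⟩
    intro hlt
    by_cases hc : pvBisect xs x lo ((lo + hi) / 2) < (lo + hi) / 2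
    · exact i4 hc
    · have : pvBisect xs x lo ((lo + hi) / 2) = (lo + hi) / 2 := by omega
      rw [this]
      exact hmid
  | case3 lo hi hlh =>
    intro hlen hle
    rw [pvBisect, dif_neg hlh]
    exact ⟨le_rfl, by omega, by omega, by omega⟩

-- bisect_left returns the length of the (·.1 < x)-takeWhile prefix, given sortedness
theorem bisect_spec (xs : List (Int × Int)) (x : Int)
    (hlt : ∀ i (h : i < xs.length), i < (xs.takeWhile (fun p => p.1 < x)).length → xs[i].1 < x)
    (hge : ∀ i (h : i < xs.length), (xs.takeWhile (fun p => p.1 < x)).length ≤ i → ¬ xs[i].1 < x) :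
    ∀ lo hi, lo ≤ (xs.takeWhile (fun p => p.1 < x)).length →
      (xs.takeWhile (fun p => p.1 < x)).length ≤ hi → hi ≤ xs.length →
      pvBisect xs x lo hi = (xs.takeWhile (fun p => p.1 < x)).length := by
  intro lo hi
  induction lo, hi using pvBisect.induct xs x with
  | case1 lo hi hlh hmid ih =>
    intro h1 h2 h3
    rw [pvBisect, dif_pos hlh, if_pos hmid]
    have hm : (lo + hi) / 2 < xs.length := by omega
    rw [List.getD_eq_getElem _ _ hm] at hmid
    have : (lo + hi) / 2 < (xs.takeWhile (fun p => p.1 < x)).length := by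
      by_contra hc
      exact hge _ hm (by omega) hmid
    exact ih (by omega) h2 h3
  | case2 lo hi hlh hmid ih =>
    intro h1 h2 h3
    rw [pvBisect, dif_pos hlh, if_neg hmid]
    have hm : (lo + hi) / 2 < xs.length := by omega
    rw [List.getD_eq_getElem _ _ hm] at hmid
    have : (xs.takeWhile (fun p => p.1 < x)).length ≤ (lo + hi) / 2 := by
      by_contra hc
      exact hmid (hlt _ hm (by omega))
    exact ih h1 (by omega) (by omega)
  | case3 lo hi hlh =>
    intro h1 h2 h3
    rw [pvBisect, dif_neg hlh]
    omega

-- the while loop consumes exactly the (·.1 < end_)-takeWhile prefix of (xs.drop h)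
theorem hiLoop_spec (xs : List (Int × Int)) (end_ : Int) :
    ∀ h s, pvHiLoop xs end_ h s =
      (h + ((xs.drop h).takeWhile (fun p => p.1 < end_)).length,
       s ++ ((xs.drop h).takeWhile (fun p => p.1 < end_)).flatMap (pvR end_)) := by
  intro h s
  induction h, s using pvHiLoop.induct xs end_ with
  | case1 h s hc ih =>
    rw [pvHiLoop, dif_pos hc]
    simp only [dite_eq_ite] at ih
    rw [ih]
    obtain ⟨hlen, hfst⟩ := hc
    rw [List.getD_eq_getElem _ _ hlen] at hfst ⊢
    have hdrop : xs.drop h = xs[h] :: xs.drop (h + 1) := List.drop_eq_getElem_cons hlen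
    rw [hdrop, List.takeWhile_cons_of_pos (by simpa using hfst)]
    simp [pvR, List.flatMap_cons]
    omega
  | case2 h s hc =>
    rw [pvHiLoop, dif_neg hc]
    rcases Nat.lt_or_ge h xs.length with hlen | hlen
    · have hfst : ¬ (xs.getD h (0,0)).1 < end_ := fun hf => hc ⟨hlen, hf⟩
      rw [List.getD_eq_getElem _ _ hlen] at hfst
      have hdrop : xs.drop h = xs[h] :: xs.drop (h + 1) := List.drop_eq_getElem_cons hlen
      rw [hdrop, List.takeWhile_cons_of_neg (by simpa using hfst)]
      simp
    · rw [List.drop_eq_nil_of_le hlen]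
      simp

-- membership-to-index helpers
theorem mem_take_index {α : Type} (l : List α) (K : Nat) (x : α) (hx : x ∈ l.take K) :
    ∃ i, ∃ h : i < l.length, i < K ∧ l[i] = x := by
  obtain ⟨i, hi, he⟩ := List.mem_iff_getElem.mp hx
  have hi' : i < l.length := by simp [List.length_take] at hi; omega
  exact ⟨i, hi', by simp [List.length_take] at hi; omega, by rw [← he]; simp [List.getElem_take]⟩

theorem mem_tw_drop_index {α : Type} (p : α → Bool) (l : List α) (D : Nat) (x : α)
    (hx : x ∈ (l.drop D).takeWhile p) :
    ∃ k, ∃ h : D + k < l.length,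
      k < ((l.drop D).takeWhile p).length ∧ l[D + k] = x ∧ p x := by
  obtain ⟨k, hk, he⟩ := List.mem_iff_getElem.mp hx
  have hk2 : k < (l.drop D).length := lt_of_lt_of_le hk (tw_le p _)
  have hlen : D + k < l.length := by simp [List.length_drop] at hk2; omega
  refine ⟨k, hlen, hk, ?_, ?_⟩
  · rw [← he, ← tw_getElem p _ k hk, List.getElem_drop]
  · rw [← he, ← tw_getElem p _ k hk]; exact tw_sat p _ k hk

theorem mem_drop_index {α : Type} (l : List α) (D : Nat) (x : α) (hx : x ∈ l.drop D) :
    ∃ k, ∃ h : D + k < l.length, l[D + k] = x := by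
  obtain ⟨k, hk, he⟩ := List.mem_iff_getElem.mp hx
  have hlen : D + k < l.length := by simp [List.length_drop] at hk; omega
  exact ⟨k, hlen, by rw [← he, List.getElem_drop]⟩

-- ===== VERDICT (by name: the statement is the Claim_ definition above) =====
theorem range_remove_spec : Claim_equal_range_remove := by
  intro l start end_ _hdom hpre
  unfold Spec_range_remove
  rw [alt_eq_flatMap]
  rcases hpre with hpre | hR
  case inr =>
    -- no-op case: both programs return the list unchanged, on any list at all
    have hB : l.flatMap (pvF start end_) = l := by
      apply flatMap_eq_self
      intro x hx
      have := hR x hx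
      unfold pvF
      by_cases hxs : x.1 < start
      · rw [if_pos (Or.inl (by simp [hxs] at this; omega))]
      · rw [if_pos (Or.inr (by simp [hxs] at this; omega))]
    rw [hB]
    obtain ⟨b1, b2, b3, b4⟩ := bisect_bounds l start 0 l.length le_rfl (Nat.zero_le _)
    set lo0 := pvBisect l start 0 l.length with hlo0
    simp only [range_remove, ← hlo0]
    have hnoadj : ¬ (0 < lo0 ∧ (l.getD (lo0 - 1) (0, 0)).2 > start) := by
      rintro ⟨hpos, hgt⟩
      have h1 : lo0 - 1 < l.length := by omega
      have hmem : l.getD (lo0 - 1) (0, 0) ∈ l := by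
        rw [List.getD_eq_getElem l (0, 0) h1]; exact List.getElem_mem h1
      have := hR _ hmem
      have hfst := b3 hpos
      rw [if_pos hfst] at this
      omega
    rw [if_neg hnoadj]
    have htw0 : (l.drop lo0).takeWhile (fun p : Int × Int => p.1 < end_) = [] := by
      rcases Nat.lt_or_ge lo0 l.length with hl | hl
      · rw [List.drop_eq_getElem_cons hl, List.takeWhile_cons_of_neg]
        have hfst := b4 hl
        rw [List.getD_eq_getElem l (0, 0) hl] at hfst
        have := hR _ (List.getElem_mem hl)
        simp [hfst] at this ⊢
        omega
      · rw [List.drop_eq_nil_of_le hl, List.takeWhile_nil]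
    rw [hiLoop_spec, htw0]
    simp
  case inl =>
    have hse : start ≤ end_ := hpre.1
    have hab := hpre.2.1
    -- N = bisect position
    have hNle : (l.takeWhile (fun p => p.1 < start)).length ≤ l.length := tw_le _ _
    set N := (l.takeWhile (fun p => p.1 < start)).length with hN
    have hlt : ∀ i (h : i < l.length), i < N → l[i].1 < start := by
      intro i h hi
      have := tw_sat (fun p => decide (p.1 < start)) l i hi
      simpa using this
    have hge : ∀ i (h : i < l.length), N ≤ i → ¬ l[i].1 < start := by
      intro i h hNi
      have hNl : N < l.length := lt_of_le_of_lt hNi h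
      have hstop : ¬ (l[N]'hNl).1 < start := by
        have h2 := tw_stop (fun p => decide (p.1 < start)) l hNl
        simp only [decide_eq_true_eq] at h2
        exact h2
      have := pre_fst_mono l hab hpre.2.2 N i hNi h
      omega
    have hbis : pvBisect l start 0 l.length = N :=
      bisect_spec l start hlt hge 0 l.length (Nat.zero_le _) hNle le_rfl
    -- the while-loop prefix from an arbitrary index D
    have hmidfacts : ∀ D, ∀ x ∈ (l.drop D).takeWhile (fun p : Int × Int => p.1 < end_),
        N ≤ D → pvF start end_ x = pvR end_ x := by
      intro D x hx hND
      obtain ⟨k, hk, -, hxe, hpx⟩ := mem_tw_drop_index _ l D x hx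
      have h1 : x.1 < end_ := by simpa using hpx
      have h2 : ¬ x.1 < start := by rw [← hxe]; exact hge _ hk (by omega)
      have h3 : x.1 < x.2 := hab x (by rw [← hxe]; exact List.getElem_mem hk)
      unfold pvF pvR
      rw [if_neg (by omega), if_neg (by omega)]
      simp
    have htail : ∀ D, N ≤ D →
        (l.drop (D + ((l.drop D).takeWhile (fun p : Int × Int => p.1 < end_)).length)).flatMap
          (pvF start end_) =
        l.drop (D + ((l.drop D).takeWhile (fun p : Int × Int => p.1 < end_)).length) := by
      intro D hND
      set M := ((l.drop D).takeWhile (fun p : Int × Int => decide (p.1 < end_))).length with hM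
      apply flatMap_eq_self
      intro x hx
      obtain ⟨k, hk, hxe⟩ := mem_drop_index l _ x hx
      have hDM : D + M < l.length := by omega
      have hMd : M < (l.drop D).length := by simp [List.length_drop]; omega
      have hstop : ¬ (l[D + M]'hDM).1 < end_ := by
        have h2 := tw_stop (fun p : Int × Int => decide (p.1 < end_)) (l.drop D) hMd
        rw [List.getElem_drop] at h2
        simp only [decide_eq_true_eq] at h2
        exact h2
      have hmono := pre_fst_mono l hab hpre.2.2 (D + M) (D + M + k) (by omega) hk
      have : end_ ≤ x.1 := by rw [← hxe]; omega
      unfold pvF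
      rw [if_pos (Or.inr (by omega))]
    have hsplitmid : ∀ D, l.drop D =
        ((l.drop D).takeWhile (fun p : Int × Int => p.1 < end_)) ++
          l.drop (D + ((l.drop D).takeWhile (fun p : Int × Int => p.1 < end_)).length) := by
      intro D
      conv_lhs => rw [← List.take_append_drop
        (((l.drop D).takeWhile (fun p : Int × Int => p.1 < end_)).length) (l.drop D)]
      rw [← List.prefix_iff_eq_take.mp (List.takeWhile_prefix _), List.drop_drop]
    simp only [range_remove, hbis]
    by_cases hadj : 0 < N ∧ (l.getD (N - 1) (0, 0)).2 > start
    · -- adjusted case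
      have hN1 : N - 1 < l.length := by omega
      rw [if_pos hadj]
      simp only [hiLoop_spec]
      have hgd : l.getD (N - 1) (0, 0) = l[N - 1] := List.getD_eq_getElem l (0, 0) hN1
      rw [hgd] at hadj ⊢
      have hhead1 : l[N - 1].1 < start := hlt (N - 1) hN1 (by omega)
      have hNN : N - 1 + 1 = N := by omega
      have hdropN1 : l.drop (N - 1) = l[N - 1] :: l.drop N := by
        rw [List.drop_eq_getElem_cons hN1, hNN]
      have htw : (l.drop (N - 1)).takeWhile (fun p : Int × Int => p.1 < end_) =
          l[N - 1] :: (l.drop N).takeWhile (fun p : Int × Int => p.1 < end_) := by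
        rw [hdropN1, List.takeWhile_cons_of_pos (by simp; omega)]
      rw [htw]
      set M := ((l.drop N).takeWhile (fun p : Int × Int => decide (p.1 < end_))).length with hM
      have hlen1 : N - 1 + (l[N - 1] ::
          (l.drop N).takeWhile (fun p : Int × Int => decide (p.1 < end_))).length = N + M := by
        simp only [List.length_cons]; omega
      rw [hlen1]
      -- split the RHS
      have hsplit : l = l.take (N - 1) ++ l[N - 1] ::
          ((l.drop N).takeWhile (fun p : Int × Int => p.1 < end_) ++ l.drop (N + M)) := by
        conv_lhs => rw [← List.take_append_drop (N - 1) l, hdropN1, hsplitmid N]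
      conv_rhs => rw [hsplit]
      have hseg1 : (l.take (N - 1)).flatMap (pvF start end_) = l.take (N - 1) := by
        apply flatMap_eq_self
        intro x hx
        obtain ⟨i, hi, hiK, hxe⟩ := mem_take_index l (N - 1) x hx
        have h1 : l[i].2 ≤ l[N - 1].1 := pre_pair l hpre.2.2 i (N - 1) (by omega) hN1
        unfold pvF
        rw [if_pos (Or.inl (by rw [← hxe]; omega))]
      have hseghead : pvF start end_ l[N - 1] = (l[N - 1].1, start) :: pvR end_ l[N - 1] := by
        unfold pvF pvR
        rw [if_neg (by rintro (h | h) <;> omega), if_pos hhead1]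
        simp
      have hseg2 : ((l.drop N).takeWhile (fun p : Int × Int => p.1 < end_)).flatMap
          (pvF start end_) =
          ((l.drop N).takeWhile (fun p : Int × Int => p.1 < end_)).flatMap (pvR end_) := by
        apply List.flatMap_congr
        intro x hx
        exact hmidfacts N x hx le_rfl
      simp only [List.flatMap_append, List.flatMap_cons]
      rw [hseg1, hseghead, hseg2, htail N le_rfl]
      simp
      omega
    · -- unadjusted case
      rw [if_neg hadj]
      simp only [hiLoop_spec]
      set M := ((l.drop N).takeWhile (fun p : Int × Int => decide (p.1 < end_))).length with hM
      have hsplit : l = l.take N ++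
          ((l.drop N).takeWhile (fun p : Int × Int => p.1 < end_) ++ l.drop (N + M)) := by
        conv_lhs => rw [← List.take_append_drop N l, hsplitmid N]
      conv_rhs => rw [hsplit]
      rw [List.flatMap_append, List.flatMap_append]
      have hkeepl : ∀ i, i < N → ∀ h : i < l.length, l[i].2 ≤ start := by
        intro i hiN hi
        have hN1 : N - 1 < l.length := by omega
        have hgd : l.getD (N - 1) (0, 0) = l[N - 1] := List.getD_eq_getElem l (0, 0) hN1
        have hlast : l[N - 1].2 ≤ start := by
          rcases not_and_or.mp hadj with h | h
          · omega
          · rw [hgd] at h; omega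
        by_cases hi1 : i = N - 1
        · subst hi1; exact hlast
        · have := pre_pair l hpre.2.2 i (N - 1) (by omega) hN1
          have := hlt (N - 1) hN1 (by omega)
          omega
      have hseg1 : (l.take N).flatMap (pvF start end_) = l.take N := by
        apply flatMap_eq_self
        intro x hx
        obtain ⟨i, hi, hiK, hxe⟩ := mem_take_index l N x hx
        unfold pvF
        rw [if_pos (Or.inl (by rw [← hxe]; exact hkeepl i hiK hi))]
      have hseg2 : ((l.drop N).takeWhile (fun p : Int × Int => p.1 < end_)).flatMap
          (pvF start end_) =
          ((l.drop N).takeWhile (fun p : Int × Int => p.1 < end_)).flatMap (pvR end_) := by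
        apply List.flatMap_congr
        intro x hx
        exact hmidfacts N x hx le_rfl
      rw [hseg1, hseg2, htail N le_rfl]
      simp
      omega
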